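-- pv_equiv track=rewrite | github.com/watovl/ReadMuller-and-Hamming-codes | ReadMuller and  Hamming code/common.py | createTableInfoCode
-- ===== SOURCE A (Python) =====
-- def convertDecimalToBinary(value, length):
--     vector = []
--     for i in range(length):
--         vector = [value // 2 ** i % 2] + vector
--     return vector
--
-- def createTableInfoCode(genMatrix):
--     n = len(genMatrix[0])
--     k = len(genMatrix)
--     count = 2 ** k
--     infoVector = [[] for i in range(count)]
--     codeVector = [[0]*n for i in range(count)]
--     for i in range(count):
--         # создание информационного вектора
--         infoVector[i] = convertDecimalToBinary(i, k)
--         # создание кодового вектора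
--         for j in range(n):
--             for l in range(k):
--                 codeVector[i][j] ^= infoVector[i][l] * genMatrix[l][j]
--     return infoVector, codeVector
-- ===== SOURCE B (Python) =====
-- def createTableInfoCode(genMatrix):
--     n = len(genMatrix[0])
--
--     def build(rows):
--         # returns list of (infoVector, codeVector) pairs for all 2^len(rows) messages
--         if not rows:
--             return [([], [0] * n)]
--         rest = build(rows[1:])
--         row = rows[0]
--         return ([([0] + v, c) for v, c in rest] +
--                 [([1] + v, [x ^ y for x, y in zip(c, row)]) for v, c in rest])
--
--     pairs = build(genMatrix)
--     return [v for v, _ in pairs], [c for _, c in pairs]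
-- ===== Notes on version B (the rewrite author's own statement) =====
-- stated objective: faster
-- what changed: A recomputes every codeword from scratch with a k-term inner loop per matrix column (O(2^k*n*k)); B builds the table by one recursion over the generator rows, doubling it each step (bit 0: keep the codeword, bit 1: xor the row in), which is O(2^k*n).
-- outside the precondition, e.g. on createTableInfoCode([]): A raises IndexError, B raises IndexError
import Mathlib
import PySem

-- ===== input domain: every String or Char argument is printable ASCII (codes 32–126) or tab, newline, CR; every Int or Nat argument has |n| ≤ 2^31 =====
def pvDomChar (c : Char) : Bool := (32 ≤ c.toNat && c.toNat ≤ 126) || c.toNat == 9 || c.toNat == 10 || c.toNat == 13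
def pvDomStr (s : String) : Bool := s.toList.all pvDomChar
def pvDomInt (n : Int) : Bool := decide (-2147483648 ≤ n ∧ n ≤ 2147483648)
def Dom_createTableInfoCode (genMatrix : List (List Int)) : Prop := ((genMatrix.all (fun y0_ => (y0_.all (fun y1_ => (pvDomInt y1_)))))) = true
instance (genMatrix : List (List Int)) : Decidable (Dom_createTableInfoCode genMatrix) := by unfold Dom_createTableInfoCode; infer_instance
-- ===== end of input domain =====

-- B replaces A's from-scratch inner k-loop per codeword by one recursion over the generator rows
-- that doubles the table (prefix bit 0 keeps the code, prefix bit 1 xors in the row): asymptotically faster.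

-- ===== PORT A =====
-- convertDecimalToBinary(value, length): i ranges over range(length), so i ≥ 0 and 2 ** i = 2 ^ i.toNat exactly.
def convertDecimalToBinary (value length : Int) : List Int :=
  (PySem.List.pyRange 0 length 1).foldl
    (fun vector i =>
      PySem.Int.mod (PySem.Int.floordiv value ((2 : Int) ^ i.toNat)) 2 :: vector) []

-- genMatrix[0] and genMatrix[l][j] raise IndexError in Python on an empty matrix / a row shorter
-- than row 0; those inputs are excluded by Pre_, so the .getD defaults are never the value claimed.
def createTableInfoCode (genMatrix : List (List Int)) : List (List Int) × List (List Int) :=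
  let n := (genMatrix.getD 0 []).length
  let k := genMatrix.length
  let count := 2 ^ k
  let init : List (List Int) × List (List Int) :=
    (List.replicate count [], List.replicate count (List.replicate n (0 : Int)))
  (List.range count).foldl
    (fun st (i : Nat) =>
      let infoi := convertDecimalToBinary (i : Int) (k : Int)
      let rowi :=
        (List.range n).foldl
          (fun row j =>
            (List.range k).foldl
              (fun row l =>
                row.set j (PySem.Int.bxor (row.getD j 0)
                  (infoi.getD l 0 * (genMatrix.getD l []).getD j 0)))
              row)
          (st.2.getD i [])
      (st.1.set i infoi, st.2.set i rowi))
    init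

-- ===== PORT B =====
def buildTable (n : Nat) (rows : List (List Int)) : List (List Int × List Int) :=
  match rows with
  | [] => [([], List.replicate n (0 : Int))]
  | r :: rest =>
    let restT := buildTable n rest
    restT.map (fun vc => ((0 : Int) :: vc.1, vc.2)) ++
      restT.map (fun vc => ((1 : Int) :: vc.1, List.zipWith PySem.Int.bxor vc.2 r))

def createTableInfoCode_alt (genMatrix : List (List Int)) : List (List Int) × List (List Int) :=
  let n := (genMatrix.getD 0 []).length
  let pairs := buildTable n genMatrix
  (pairs.map Prod.fst, pairs.map Prod.snd)

-- ===== PRECONDITION & SPEC =====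
-- Pre_ excludes exactly the inputs where Python A raises IndexError: the empty matrix
-- (genMatrix[0]) and matrices with a row shorter than row 0 (genMatrix[l][j] for j < n).
def Pre_createTableInfoCode (genMatrix : List (List Int)) : Prop :=
  genMatrix ≠ [] ∧ ∀ row ∈ genMatrix, (genMatrix.getD 0 []).length ≤ row.length
instance (genMatrix : List (List Int)) : Decidable (Pre_createTableInfoCode genMatrix) := by
  unfold Pre_createTableInfoCode; infer_instance

def pvWitness_createTableInfoCode : List (List Int) := [[1, 0, 1], [0, 1, 1]]

def Spec_createTableInfoCode (genMatrix : List (List Int)) (out : List (List Int) × List (List Int)) : Prop :=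
  out = createTableInfoCode_alt genMatrix
instance (genMatrix : List (List Int)) (out : List (List Int) × List (List Int)) :
    Decidable (Spec_createTableInfoCode genMatrix out) := by
  unfold Spec_createTableInfoCode; infer_instance

-- ===== CLAIM (what is proved, stated in full; the proofs are below) =====
def Claim_equal_createTableInfoCode : Prop :=
  ∀ (genMatrix : List (List Int)), Dom_createTableInfoCode genMatrix →
    Pre_createTableInfoCode genMatrix →
    Spec_createTableInfoCode genMatrix (createTableInfoCode genMatrix)

-- ===== LEMMAS AND PROOFS =====

-- PySem.Int.bxor is associative: encode an Int as (sign, magnitude) so that bxor is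
-- componentwise (Bool.xor, Nat.xor), then associativity transports.
def pvEnc (a : Int) : Bool × Nat := (decide (a < 0), if 0 ≤ a then a.toNat else (-a - 1).toNat)
def pvDec (p : Bool × Nat) : Int := if p.1 then -(p.2 : Int) - 1 else (p.2 : Int)
def pvPXor (p q : Bool × Nat) : Bool × Nat := (xor p.1 q.1, p.2 ^^^ q.2)

theorem pvDec_enc (a : Int) : pvDec (pvEnc a) = a := by
  unfold pvEnc pvDec
  by_cases h : 0 ≤ a <;> simp [h, not_lt.2] <;> omega

theorem pvEnc_bxor (a b : Int) : pvEnc (PySem.Int.bxor a b) = pvPXor (pvEnc a) (pvEnc b) := by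
  unfold PySem.Int.bxor pvEnc pvPXor
  by_cases ha : 0 ≤ a <;> by_cases hb : 0 ≤ b <;>
      simp only [ha, hb, if_true, if_false, Prod.mk.injEq] <;>
      refine ⟨?_, ?_⟩ <;>
      simp [not_lt.2, not_le.1, ha, hb,
        show ∀ x : Nat, (-(x : Int) - 1) < 0 from fun x => by omega] <;>
    omega

theorem pvPXor_assoc (p q r : Bool × Nat) : pvPXor (pvPXor p q) r = pvPXor p (pvPXor q r) := by
  simp [pvPXor, Nat.xor_assoc]

theorem bxor_assoc' (a b c : Int) :
    PySem.Int.bxor (PySem.Int.bxor a b) c = PySem.Int.bxor a (PySem.Int.bxor b c) := by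
  have h : pvEnc (PySem.Int.bxor (PySem.Int.bxor a b) c)
      = pvEnc (PySem.Int.bxor a (PySem.Int.bxor b c)) := by
    simp [pvEnc_bxor, pvPXor_assoc]
  have := congrArg pvDec h
  simpa [pvDec_enc] using this

theorem zero_bxor (a : Int) : PySem.Int.bxor 0 a = a := by
  rw [PySem.Int.bxor_comm, PySem.Int.bxor_zero]

-- the mathematical shape both ports compute
def bitsOf (i k : Nat) : List Int :=
  ((List.range k).map (fun t => ((i / 2 ^ t % 2 : Nat) : Int))).reverse

def xsum (g : List (List Int)) (v : List Int) (j : Nat) : Int :=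
  (List.range g.length).foldl
    (fun a l => PySem.Int.bxor a (v.getD l 0 * (g.getD l []).getD j 0)) 0

def rowOf (n : Nat) (g : List (List Int)) (v : List Int) : List Int :=
  (List.range n).map (xsum g v)

-- generic helpers for the mutation-style loops of port A
theorem foldl_cons_rev {α β : Type} (f : α → β) (l : List α) (acc : List β) :
    l.foldl (fun acc x => f x :: acc) acc = (l.map f).reverse ++ acc := by
  induction l generalizing acc with
  | nil => simp
  | cons x xs ih => simp [ih]

theorem foldl_set_same {β : Type} (j : Nat) (f : Int → β → Int) (l : List β) :
    ∀ row : List Int,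
      l.foldl (fun r x => r.set j (f (r.getD j 0) x)) row
        = row.set j (l.foldl f (row.getD j 0)) := by
  induction l with
  | nil =>
    intro row
    by_cases h : j < row.length
    · simp only [List.foldl_nil]
      rw [List.getD_eq_getElem?_getD, List.getElem?_eq_getElem h, Option.getD_some]
      exact (List.set_getElem_self h).symm
    · simp only [List.foldl_nil]
      rw [List.set_eq_of_length_le (by omega)]
  | cons x xs ih =>
    intro row
    rw [List.foldl_cons, List.foldl_cons, ih]
    by_cases h : j < row.length
    · have hget : (row.set j (f (row.getD j 0) x)).getD j 0 = f (row.getD j 0) x := by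
        rw [List.getD_eq_getElem?_getD, List.getElem?_set_self h, Option.getD_some]
      rw [hget, List.set_set]
    · have hs : ∀ y : Int, row.set j y = row := fun y => List.set_eq_of_length_le (by omega)
      rw [hs, hs, hs]

theorem foldl_set_range {α : Type} (f : Nat → α → α) (d : α) :
    ∀ (m : Nat) (init : List α), m ≤ init.length →
      (List.range m).foldl (fun acc i => acc.set i (f i (acc.getD i d))) init
        = (List.range m).map (fun i => f i (init.getD i d)) ++ init.drop m := by
  intro m
  induction m with
  | zero => intro init _; simp
  | succ m ih =>
    intro init hm
    have hmlt : m < init.length := by omega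
    rw [List.range_succ, List.foldl_append, List.map_append, ih init (by omega)]
    have hlen : ((List.range m).map (fun i => f i (init.getD i d))).length = m := by simp
    have hdrop : init.drop m = init[m] :: init.drop (m + 1) := List.drop_eq_getElem_cons hmlt
    have hget : ((List.range m).map (fun i => f i (init.getD i d)) ++ init.drop m).getD m d
        = init.getD m d := by
      rw [List.getD_eq_getElem?_getD, List.getElem?_append_right (by omega), hlen,
        Nat.sub_self, List.getElem?_drop, List.getD_eq_getElem?_getD, Nat.add_zero]
    simp only [List.foldl_cons, List.foldl_nil, hget]
    rw [List.set_append, if_neg (by omega), hlen, Nat.sub_self, hdrop, List.set_cons_zero]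
    simp [List.getD_eq_getElem?_getD, List.getElem?_eq_getElem hmlt]

theorem foldl_pair_indep {α β ι : Type} (f : α → ι → α) (g : β → ι → β) :
    ∀ (l : List ι) (a : α) (b : β),
      l.foldl (fun st i => (f st.1 i, g st.2 i)) (a, b) = (l.foldl f a, l.foldl g b) := by
  intro l
  induction l with
  | nil => intro a b; rfl
  | cons x xs ih => intro a b; simp [ih]

-- convertDecimalToBinary computes bitsOf
theorem conv_eq_bitsOf (i k : Nat) :
    convertDecimalToBinary (i : Int) (k : Int) = bitsOf i k := by
  unfold convertDecimalToBinary bitsOf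
  rw [show PySem.List.pyRange 0 (k : Int) 1 = PySem.List.pyRange 0 (k : Int) from rfl,
    PySem.List.pyRange_zero_natCast, List.foldl_map]
  rw [foldl_cons_rev (fun t : Nat =>
    PySem.Int.mod (PySem.Int.floordiv (i : Int) ((2 : Int) ^ ((t : Int)).toNat)) 2)]
  simp only [List.append_nil]
  congr 1
  apply List.map_congr_left
  intro t _
  have h2 : ((2 : Int) ^ ((t : Int)).toNat) = ((2 ^ t : Nat) : Int) := by
    simp
  rw [h2, PySem.Int.floordiv_natCast, show (2 : Int) = ((2 : Nat) : Int) from rfl,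
    PySem.Int.mod_natCast]

-- bitsOf splitting
theorem bitsOf_succ (i k : Nat) :
    bitsOf i (k + 1) = ((i / 2 ^ k % 2 : Nat) : Int) :: bitsOf i k := by
  unfold bitsOf
  rw [List.range_succ, List.map_append, List.reverse_append]
  simp

theorem bitsOf_lo (i k : Nat) (h : i < 2 ^ k) :
    bitsOf i (k + 1) = 0 :: bitsOf i k := by
  rw [bitsOf_succ, Nat.div_eq_of_lt h]; rfl

theorem bitsOf_hi (i k : Nat) (h : i < 2 ^ k) :
    bitsOf (2 ^ k + i) (k + 1) = 1 :: bitsOf i k := by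
  rw [bitsOf_succ]
  have h1 : (2 ^ k + i) / 2 ^ k = 1 := by
    rw [Nat.add_comm, Nat.add_div_right i (Nat.pos_of_ne_zero (by positivity)),
      Nat.div_eq_of_lt h]
  rw [h1]
  congr 1
  unfold bitsOf
  congr 1
  apply List.map_congr_left
  intro t ht
  have ht' : t < k := List.mem_range.1 ht
  have : 2 ^ k + i = i + 2 ^ (k - t - 1) * 2 * 2 ^ t := by
    have : 2 ^ (k - t - 1) * 2 * 2 ^ t = 2 ^ k := by
      rw [mul_assoc, mul_comm 2 (2 ^ t), ← pow_succ, ← pow_add]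
      congr 1; omega
    omega
  rw [this, Nat.add_mul_div_right _ _ (Nat.pos_of_ne_zero (by positivity)),
    Nat.add_mul_mod_self_right]

-- xsum recursion
theorem foldl_bxor_start {β : Type} (f : β → Int) (l : List β) :
    ∀ s : Int, l.foldl (fun a x => PySem.Int.bxor a (f x)) s
      = PySem.Int.bxor s (l.foldl (fun a x => PySem.Int.bxor a (f x)) 0) := by
  induction l with
  | nil => intro s; simp [PySem.Int.bxor_zero]
  | cons x xs ih =>
    intro s
    simp only [List.foldl_cons]
    rw [ih (PySem.Int.bxor s (f x)), ih (PySem.Int.bxor 0 (f x)), bxor_assoc', zero_bxor]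

theorem xsum_cons (r : List Int) (rest : List (List Int)) (b : Int) (v : List Int) (j : Nat) :
    xsum (r :: rest) (b :: v) j = PySem.Int.bxor (b * r.getD j 0) (xsum rest v j) := by
  unfold xsum
  rw [show (r :: rest).length = rest.length + 1 from rfl, List.range_succ_eq_map,
    List.foldl_cons, List.foldl_map]
  simp only [List.getD_cons_zero, List.getD_cons_succ, Nat.succ_eq_add_one]
  rw [foldl_bxor_start (fun l : Nat => v.getD l 0 * (rest.getD l []).getD j 0), zero_bxor]

theorem rowOf_zero (n : Nat) (r : List Int) (rest : List (List Int)) (v : List Int) :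
    rowOf n (r :: rest) ((0 : Int) :: v) = rowOf n rest v := by
  unfold rowOf
  apply List.map_congr_left
  intro j _
  rw [xsum_cons, zero_mul, zero_bxor]

theorem rowOf_one (n : Nat) (r : List Int) (rest : List (List Int)) (v : List Int)
    (hr : n ≤ r.length) :
    rowOf n (r :: rest) ((1 : Int) :: v) = List.zipWith PySem.Int.bxor (rowOf n rest v) r := by
  apply List.ext_getElem
  · simp [rowOf]; omega
  · intro j h1 h2
    have hj : j < n := by simpa [rowOf] using h1
    simp only [List.getElem_zipWith, rowOf, List.getElem_map, List.getElem_range]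
    rw [xsum_cons, one_mul, PySem.Int.bxor_comm]
    congr 1
    rw [List.getD_eq_getElem?_getD, List.getElem?_eq_getElem (by omega), Option.getD_some]

-- B computes the table of (bitsOf, rowOf)
theorem buildTable_eq (n : Nat) :
    ∀ g : List (List Int), (∀ r ∈ g, n ≤ r.length) →
      buildTable n g = (List.range (2 ^ g.length)).map
        (fun i => (bitsOf i g.length, rowOf n g (bitsOf i g.length))) := by
  intro g
  induction g with
  | nil =>
    intro _
    have hx : rowOf n [] [] = List.replicate n 0 := by
      apply List.ext_getElem
      · simp [rowOf]
      · intro j h1 h2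
        simp [rowOf, xsum]
    simp only [buildTable, List.length_nil, pow_zero, List.range_one, List.map_cons,
      List.map_nil]
    rw [show bitsOf 0 0 = [] from rfl, hx]
  | cons r rest ih =>
    intro hrows
    have hr : n ≤ r.length := hrows r (by simp)
    have hrest : ∀ r' ∈ rest, n ≤ r'.length := fun r' h => hrows r' (by simp [h])
    show buildTable n (r :: rest) = _
    rw [show (r :: rest).length = rest.length + 1 from rfl]
    have h2 : 2 ^ (rest.length + 1) = 2 ^ rest.length + 2 ^ rest.length := by ring
    rw [h2, List.range_add, List.map_append, List.map_map]
    unfold buildTable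
    rw [ih hrest]
    simp only [List.map_map]
    congr 1
    · apply List.map_congr_left
      intro i hi
      have hi' : i < 2 ^ rest.length := List.mem_range.1 hi
      simp only [Function.comp_apply, bitsOf_lo i rest.length hi', rowOf_zero]
    · apply List.map_congr_left
      intro i hi
      have hi' : i < 2 ^ rest.length := List.mem_range.1 hi
      simp only [Function.comp_apply, bitsOf_hi i rest.length hi', rowOf_one n r rest _ hr]

-- A computes the same table
-- the inner k-fold of port A, as a function of the running cell value
def innerF (g : List (List Int)) (k i j : Nat) (a : Int) : Int :=
  (List.range k).foldl
    (fun a l => PySem.Int.bxor a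
      ((convertDecimalToBinary (i : Int) (k : Int)).getD l 0 * (g.getD l []).getD j 0)) a

theorem createTableInfoCode_eq (g : List (List Int)) :
    createTableInfoCode g =
      ((List.range (2 ^ g.length)).map (fun i => bitsOf i g.length),
       (List.range (2 ^ g.length)).map
         (fun i => rowOf ((g.getD 0 []).length) g (bitsOf i g.length))) := by
  unfold createTableInfoCode
  set n := (g.getD 0 []).length with hn
  set k := g.length with hk
  set count := 2 ^ k with hcount
  -- the per-row computation of A applied to the initial (all-zero) row
  have hrowcomp : ∀ (i : Nat) (row0 : List Int), row0 = List.replicate n (0 : Int) →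
      (List.range n).foldl
        (fun row j =>
          (List.range k).foldl
            (fun row l =>
              row.set j (PySem.Int.bxor (row.getD j 0)
                ((convertDecimalToBinary (i : Int) (k : Int)).getD l 0 * (g.getD l []).getD j 0)))
            row)
        row0 = rowOf n g (bitsOf i k) := by
    intro i row0 hrow0
    have hfg : (fun (row : List Int) (j : Nat) =>
          (List.range k).foldl
            (fun row l =>
              row.set j (PySem.Int.bxor (row.getD j 0)
                ((convertDecimalToBinary (i : Int) (k : Int)).getD l 0 * (g.getD l []).getD j 0)))
            row)
        = fun (row : List Int) (j : Nat) => row.set j (innerF g k i j (row.getD j 0)) := by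
      funext row j
      exact foldl_set_same j
        (fun a l => PySem.Int.bxor a
          ((convertDecimalToBinary (i : Int) (k : Int)).getD l 0 * (g.getD l []).getD j 0))
        (List.range k) row
    rw [hfg, foldl_set_range (innerF g k i) (0 : Int) n row0 (by simp [hrow0])]
    subst hrow0
    simp only [List.drop_replicate, Nat.sub_self, List.replicate_zero, List.append_nil]
    apply List.map_congr_left
    intro j hj
    rw [List.getD_replicate _ (List.mem_range.1 hj)]
    unfold innerF xsum
    rw [conv_eq_bitsOf, ← hk]
  rw [foldl_pair_indep (fun info (i : Nat) => info.set i (convertDecimalToBinary (i : Int) (k : Int)))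
    (fun code (i : Nat) =>
      code.set i ((List.range n).foldl
        (fun row j =>
          (List.range k).foldl
            (fun row l =>
              row.set j (PySem.Int.bxor (row.getD j 0)
                ((convertDecimalToBinary (i : Int) (k : Int)).getD l 0 * (g.getD l []).getD j 0)))
            row)
        (code.getD i [])))
    (List.range count) (List.replicate count []) (List.replicate count (List.replicate n 0))]
  simp only [Prod.mk.injEq]
  constructor
  · have hshape : (fun (info : List (List Int)) (i : Nat) =>
          info.set i (convertDecimalToBinary (i : Int) (k : Int)))
        = fun (info : List (List Int)) (i : Nat) =>
            info.set i ((fun (i : Nat) (_ : List Int) => convertDecimalToBinary (i : Int) (k : Int))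
              i (info.getD i [])) := rfl
    rw [hshape, foldl_set_range (fun (i : Nat) (_ : List Int) =>
        convertDecimalToBinary (i : Int) (k : Int)) ([] : List Int) count
        (List.replicate count []) (by simp)]
    simp only [List.drop_replicate, Nat.sub_self, List.replicate_zero, List.append_nil]
    apply List.map_congr_left
    intro i _
    exact conv_eq_bitsOf i k
  · have hshape : (fun (code : List (List Int)) (i : Nat) =>
          code.set i ((List.range n).foldl
            (fun row j =>
              (List.range k).foldl
                (fun row l =>
                  row.set j (PySem.Int.bxor (row.getD j 0)
                    ((convertDecimalToBinary (i : Int) (k : Int)).getD l 0 * (g.getD l []).getD j 0)))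
                row)
            (code.getD i [])))
        = fun (code : List (List Int)) (i : Nat) =>
            code.set i ((fun (i : Nat) (a : List Int) => (List.range n).foldl
              (fun row j =>
                (List.range k).foldl
                  (fun row l =>
                    row.set j (PySem.Int.bxor (row.getD j 0)
                      ((convertDecimalToBinary (i : Int) (k : Int)).getD l 0 * (g.getD l []).getD j 0)))
                  row) a) i (code.getD i [])) := rfl
    rw [hshape, foldl_set_range (fun (i : Nat) (a : List Int) =>
        (List.range n).foldl
          (fun row j =>
            (List.range k).foldl
              (fun row l =>
                row.set j (PySem.Int.bxor (row.getD j 0)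
                  ((convertDecimalToBinary (i : Int) (k : Int)).getD l 0 * (g.getD l []).getD j 0)))
              row) a) ([] : List Int) count
        (List.replicate count (List.replicate n 0)) (by simp)]
    simp only [List.drop_replicate, Nat.sub_self, List.replicate_zero, List.append_nil]
    apply List.map_congr_left
    intro i hi
    rw [List.getD_replicate _ (List.mem_range.1 hi)]
    exact hrowcomp i _ rfl

-- ===== VERDICT (by name: the statement is the Claim_ definition above) =====
theorem createTableInfoCode_spec : Claim_equal_createTableInfoCode := by
  intro g _ hpre
  unfold Spec_createTableInfoCode createTableInfoCode_alt
  rw [createTableInfoCode_eq]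
  show _ = ((buildTable (g.getD 0 []).length g).map Prod.fst,
    (buildTable (g.getD 0 []).length g).map Prod.snd)
  rw [buildTable_eq _ g hpre.2]
  simp [List.map_map, Function.comp]
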